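-- pv_equiv track=rewrite | github.com/nexon33/voynich-grammar-analysis | scripts/semantic_validation/detailed_pattern_analysis.py | categorize_al_patterns
-- ===== SOURCE A (Python) =====
-- def categorize_al_patterns(al_sentences):
--     """Categorize how [?al] appears in sentences"""
--
--     categories = {
--         "with_ch_verb": [],
--         "with_sh_verb": [],
--         "with_both_verbs": [],
--         "with_vessel": [],
--         "with_water": [],
--         "with_botanical": [],
--         "with_oak_gen": [],
--         "with_oat_gen": [],
--         "standalone": [],
--         "other": [],
--     }
--
--     for item in al_sentences:
--         sentence = item["sentence"]
--
--         has_ch = "[?ch]" in sentence and "VERB" in sentence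
--         has_sh = "[?sh]" in sentence and "VERB" in sentence
--
--         if has_ch and has_sh:
--             categories["with_both_verbs"].append(item)
--         elif has_ch:
--             categories["with_ch_verb"].append(item)
--         elif has_sh:
--             categories["with_sh_verb"].append(item)
--
--         if "vessel" in sentence.lower():
--             categories["with_vessel"].append(item)
--         if "water" in sentence.lower():
--             categories["with_water"].append(item)
--         if "botanical-term" in sentence:
--             categories["with_botanical"].append(item)
--         if "oak-GEN" in sentence:
--             categories["with_oak_gen"].append(item)
--         if "oat-GEN" in sentence:
--             categories["with_oat_gen"].append(item)
--
--         # Check if standalone [?al]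
--         if (
--             sentence.strip() == "[?al]"
--             or sentence.count("[?al]") > 0
--             and sentence.count(" ") < 5
--         ):
--             categories["standalone"].append(item)
--
--     return categories
-- ===== SOURCE B (Python) =====
-- def categorize_al_patterns(al_sentences):
--     """Categorize how [?al] appears in sentences (declarative per-category filters)."""
--
--     def sent(item):
--         return item["sentence"]
--
--     def has_ch(item):
--         s = sent(item)
--         return "[?ch]" in s and "VERB" in s
--
--     def has_sh(item):
--         s = sent(item)
--         return "[?sh]" in s and "VERB" in s
--
--     def standalone(item):
--         s = sent(item)
--         return s.strip() == "[?al]" or (s.count("[?al]") > 0 and s.count(" ") < 5)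
--
--     return {
--         "with_ch_verb": [it for it in al_sentences if has_ch(it) and not has_sh(it)],
--         "with_sh_verb": [it for it in al_sentences if has_sh(it) and not has_ch(it)],
--         "with_both_verbs": [it for it in al_sentences if has_ch(it) and has_sh(it)],
--         "with_vessel": [it for it in al_sentences if "vessel" in sent(it).lower()],
--         "with_water": [it for it in al_sentences if "water" in sent(it).lower()],
--         "with_botanical": [it for it in al_sentences if "botanical-term" in sent(it)],
--         "with_oak_gen": [it for it in al_sentences if "oak-GEN" in sent(it)],
--         "with_oat_gen": [it for it in al_sentences if "oat-GEN" in sent(it)],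
--         "standalone": [it for it in al_sentences if standalone(it)],
--         "other": [],
--     }
-- ===== Notes on version B (the rewrite author's own statement) =====
-- stated objective: simpler
-- what changed: The single mutating accumulation loop over a pre-built dict of buckets is replaced by a declarative dict literal with one filtering comprehension per category (the if/elif verb exclusivity made explicit as has_ch/has_sh conjunctions).
import Mathlib
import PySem

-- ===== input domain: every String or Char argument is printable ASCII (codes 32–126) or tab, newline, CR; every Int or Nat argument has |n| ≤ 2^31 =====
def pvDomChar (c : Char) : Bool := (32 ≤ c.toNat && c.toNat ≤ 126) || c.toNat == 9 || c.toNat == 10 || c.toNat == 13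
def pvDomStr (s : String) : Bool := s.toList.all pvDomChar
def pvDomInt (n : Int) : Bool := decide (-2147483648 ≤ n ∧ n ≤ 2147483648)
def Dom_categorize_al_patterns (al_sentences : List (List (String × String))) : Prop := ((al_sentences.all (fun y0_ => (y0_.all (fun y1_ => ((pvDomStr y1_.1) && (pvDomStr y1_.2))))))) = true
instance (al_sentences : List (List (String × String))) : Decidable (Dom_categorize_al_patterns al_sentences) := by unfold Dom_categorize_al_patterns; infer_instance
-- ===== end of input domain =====

-- B replaces A's single mutating accumulation loop over a dict of buckets by one declarative
-- filtering comprehension per category (objective: simpler); return values agree on Pre_.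

-- ===== PORT A =====
-- loop body of A's for-loop, one step of the fold
def stepA (categories : PySem.Dict String (List (List (String × String))))
    (item : List (String × String)) : PySem.Dict String (List (List (String × String))) :=
  let sentence := (PySem.Dict.get? (PySem.Dict.ofList item) "sentence").getD ""
  let has_ch := PySem.Str.isIn "[?ch]" sentence && PySem.Str.isIn "VERB" sentence
  let has_sh := PySem.Str.isIn "[?sh]" sentence && PySem.Str.isIn "VERB" sentence
  let categories :=
    if has_ch && has_sh then categories.modify "with_both_verbs" [] (· ++ [item])
    else if has_ch then categories.modify "with_ch_verb" [] (· ++ [item])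
    else if has_sh then categories.modify "with_sh_verb" [] (· ++ [item])
    else categories
  let categories :=
    if PySem.Str.isIn "vessel" (PySem.Str.lower sentence) then categories.modify "with_vessel" [] (· ++ [item]) else categories
  let categories :=
    if PySem.Str.isIn "water" (PySem.Str.lower sentence) then categories.modify "with_water" [] (· ++ [item]) else categories
  let categories :=
    if PySem.Str.isIn "botanical-term" sentence then categories.modify "with_botanical" [] (· ++ [item]) else categories
  let categories :=
    if PySem.Str.isIn "oak-GEN" sentence then categories.modify "with_oak_gen" [] (· ++ [item]) else categories
  let categories :=
    if PySem.Str.isIn "oat-GEN" sentence then categories.modify "with_oat_gen" [] (· ++ [item]) else categories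
  let categories :=
    if PySem.Str.strip sentence == "[?al]"
        || (decide (0 < PySem.Str.count sentence "[?al]") && decide (PySem.Str.count sentence " " < 5)) then
      categories.modify "standalone" [] (· ++ [item])
    else categories
  categories

def categorize_al_patterns (al_sentences : List (List (String × String))) : List (String × List (List (String × String))) :=
  let categories : PySem.Dict String (List (List (String × String))) :=
    PySem.Dict.ofList
      [("with_ch_verb", []), ("with_sh_verb", []), ("with_both_verbs", []),
       ("with_vessel", []), ("with_water", []), ("with_botanical", []),
       ("with_oak_gen", []), ("with_oat_gen", []), ("standalone", []), ("other", [])]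
  let categories := al_sentences.foldl stepA categories
  categories.items

-- ===== PORT B =====
def pvSentence (item : List (String × String)) : String :=
  (PySem.Dict.get? (PySem.Dict.ofList item) "sentence").getD ""

def pvHasCh (item : List (String × String)) : Bool :=
  PySem.Str.isIn "[?ch]" (pvSentence item) && PySem.Str.isIn "VERB" (pvSentence item)

def pvHasSh (item : List (String × String)) : Bool :=
  PySem.Str.isIn "[?sh]" (pvSentence item) && PySem.Str.isIn "VERB" (pvSentence item)

def pvStandalone (item : List (String × String)) : Bool :=
  PySem.Str.strip (pvSentence item) == "[?al]"
    || (decide (0 < PySem.Str.count (pvSentence item) "[?al]") && decide (PySem.Str.count (pvSentence item) " " < 5))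

def categorize_al_patterns_alt (al_sentences : List (List (String × String))) : List (String × List (List (String × String))) :=
  [("with_ch_verb", al_sentences.filter (fun it => pvHasCh it && !pvHasSh it)),
   ("with_sh_verb", al_sentences.filter (fun it => pvHasSh it && !pvHasCh it)),
   ("with_both_verbs", al_sentences.filter (fun it => pvHasCh it && pvHasSh it)),
   ("with_vessel", al_sentences.filter (fun it => PySem.Str.isIn "vessel" (PySem.Str.lower (pvSentence it)))),
   ("with_water", al_sentences.filter (fun it => PySem.Str.isIn "water" (PySem.Str.lower (pvSentence it)))),
   ("with_botanical", al_sentences.filter (fun it => PySem.Str.isIn "botanical-term" (pvSentence it))),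
   ("with_oak_gen", al_sentences.filter (fun it => PySem.Str.isIn "oak-GEN" (pvSentence it))),
   ("with_oat_gen", al_sentences.filter (fun it => PySem.Str.isIn "oat-GEN" (pvSentence it))),
   ("standalone", al_sentences.filter pvStandalone),
   ("other", [])]

-- ===== PRECONDITION & SPEC =====
-- Pre_ excludes items without a "sentence" key, on which the Python A raises KeyError.
def Pre_categorize_al_patterns (al_sentences : List (List (String × String))) : Prop :=
  ∀ item ∈ al_sentences, "sentence" ∈ item.map Prod.fst

instance (al_sentences : List (List (String × String))) : Decidable (Pre_categorize_al_patterns al_sentences) := by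
  unfold Pre_categorize_al_patterns; infer_instance

def pvWitness_categorize_al_patterns : (List (List (String × String))) :=
  [[("sentence", "[?al]")], [("sentence", "[?ch] VERB water x")]]

def Spec_categorize_al_patterns (al_sentences : List (List (String × String))) (out : List (String × List (List (String × String)))) : Prop := out = categorize_al_patterns_alt al_sentences
instance (al_sentences : List (List (String × String))) (out : List (String × List (List (String × String)))) : Decidable (Spec_categorize_al_patterns al_sentences out) := by unfold Spec_categorize_al_patterns; infer_instance

-- ===== CLAIM (what is proved, stated in full; the proofs are below) =====
def Claim_equal_categorize_al_patterns : Prop := ∀ (al_sentences : List (List (String × String))), Dom_categorize_al_patterns al_sentences → Pre_categorize_al_patterns al_sentences → Spec_categorize_al_patterns al_sentences (categorize_al_patterns al_sentences)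

-- ===== LEMMAS AND PROOFS =====

-- the dict A maintains, as a 10-component literal
def mk10 (c1 c2 c3 c4 c5 c6 c7 c8 c9 c10 : List (List (String × String))) :
    PySem.Dict String (List (List (String × String))) :=
  PySem.Dict.mk
    [("with_ch_verb", c1), ("with_sh_verb", c2), ("with_both_verbs", c3),
     ("with_vessel", c4), ("with_water", c5), ("with_botanical", c6),
     ("with_oak_gen", c7), ("with_oat_gen", c8), ("standalone", c9), ("other", c10)]

theorem uverb (bch bsh : Bool) (c1 c2 c3 c4 c5 c6 c7 c8 c9 c10 : List (List (String × String)))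
    (it : List (String × String)) :
    (if bch && bsh then (mk10 c1 c2 c3 c4 c5 c6 c7 c8 c9 c10).modify "with_both_verbs" [] (· ++ [it])
     else if bch then (mk10 c1 c2 c3 c4 c5 c6 c7 c8 c9 c10).modify "with_ch_verb" [] (· ++ [it])
     else if bsh then (mk10 c1 c2 c3 c4 c5 c6 c7 c8 c9 c10).modify "with_sh_verb" [] (· ++ [it])
     else mk10 c1 c2 c3 c4 c5 c6 c7 c8 c9 c10) =
      mk10 (if bch && !bsh then c1 ++ [it] else c1)
           (if bsh && !bch then c2 ++ [it] else c2)
           (if bch && bsh then c3 ++ [it] else c3) c4 c5 c6 c7 c8 c9 c10 := by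
  cases bch <;> cases bsh <;> rfl

theorem u4 (b : Bool) (c1 c2 c3 c4 c5 c6 c7 c8 c9 c10 : List (List (String × String)))
    (it : List (String × String)) :
    (if b then (mk10 c1 c2 c3 c4 c5 c6 c7 c8 c9 c10).modify "with_vessel" [] (· ++ [it])
     else mk10 c1 c2 c3 c4 c5 c6 c7 c8 c9 c10) =
      mk10 c1 c2 c3 (if b then c4 ++ [it] else c4) c5 c6 c7 c8 c9 c10 := by
  cases b <;> rfl

theorem u5 (b : Bool) (c1 c2 c3 c4 c5 c6 c7 c8 c9 c10 : List (List (String × String)))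
    (it : List (String × String)) :
    (if b then (mk10 c1 c2 c3 c4 c5 c6 c7 c8 c9 c10).modify "with_water" [] (· ++ [it])
     else mk10 c1 c2 c3 c4 c5 c6 c7 c8 c9 c10) =
      mk10 c1 c2 c3 c4 (if b then c5 ++ [it] else c5) c6 c7 c8 c9 c10 := by
  cases b <;> rfl

theorem u6 (b : Bool) (c1 c2 c3 c4 c5 c6 c7 c8 c9 c10 : List (List (String × String)))
    (it : List (String × String)) :
    (if b then (mk10 c1 c2 c3 c4 c5 c6 c7 c8 c9 c10).modify "with_botanical" [] (· ++ [it])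
     else mk10 c1 c2 c3 c4 c5 c6 c7 c8 c9 c10) =
      mk10 c1 c2 c3 c4 c5 (if b then c6 ++ [it] else c6) c7 c8 c9 c10 := by
  cases b <;> rfl

theorem u7 (b : Bool) (c1 c2 c3 c4 c5 c6 c7 c8 c9 c10 : List (List (String × String)))
    (it : List (String × String)) :
    (if b then (mk10 c1 c2 c3 c4 c5 c6 c7 c8 c9 c10).modify "with_oak_gen" [] (· ++ [it])
     else mk10 c1 c2 c3 c4 c5 c6 c7 c8 c9 c10) =
      mk10 c1 c2 c3 c4 c5 c6 (if b then c7 ++ [it] else c7) c8 c9 c10 := by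
  cases b <;> rfl

theorem u8 (b : Bool) (c1 c2 c3 c4 c5 c6 c7 c8 c9 c10 : List (List (String × String)))
    (it : List (String × String)) :
    (if b then (mk10 c1 c2 c3 c4 c5 c6 c7 c8 c9 c10).modify "with_oat_gen" [] (· ++ [it])
     else mk10 c1 c2 c3 c4 c5 c6 c7 c8 c9 c10) =
      mk10 c1 c2 c3 c4 c5 c6 c7 (if b then c8 ++ [it] else c8) c9 c10 := by
  cases b <;> rfl

theorem u9 (b : Bool) (c1 c2 c3 c4 c5 c6 c7 c8 c9 c10 : List (List (String × String)))
    (it : List (String × String)) :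
    (if b then (mk10 c1 c2 c3 c4 c5 c6 c7 c8 c9 c10).modify "standalone" [] (· ++ [it])
     else mk10 c1 c2 c3 c4 c5 c6 c7 c8 c9 c10) =
      mk10 c1 c2 c3 c4 c5 c6 c7 c8 (if b then c9 ++ [it] else c9) c10 := by
  cases b <;> rfl

theorem step_mk10 (it : List (String × String))
    (c1 c2 c3 c4 c5 c6 c7 c8 c9 c10 : List (List (String × String)))
    (bch bsh b4 b5 b6 b7 b8 b9 : Bool)
    (hch : (PySem.Str.isIn "[?ch]" ((PySem.Dict.get? (PySem.Dict.ofList it) "sentence").getD "") && PySem.Str.isIn "VERB" ((PySem.Dict.get? (PySem.Dict.ofList it) "sentence").getD "")) = bch)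
    (hsh : (PySem.Str.isIn "[?sh]" ((PySem.Dict.get? (PySem.Dict.ofList it) "sentence").getD "") && PySem.Str.isIn "VERB" ((PySem.Dict.get? (PySem.Dict.ofList it) "sentence").getD "")) = bsh)
    (h4 : PySem.Str.isIn "vessel" (PySem.Str.lower ((PySem.Dict.get? (PySem.Dict.ofList it) "sentence").getD "")) = b4)
    (h5 : PySem.Str.isIn "water" (PySem.Str.lower ((PySem.Dict.get? (PySem.Dict.ofList it) "sentence").getD "")) = b5)
    (h6 : PySem.Str.isIn "botanical-term" ((PySem.Dict.get? (PySem.Dict.ofList it) "sentence").getD "") = b6)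
    (h7 : PySem.Str.isIn "oak-GEN" ((PySem.Dict.get? (PySem.Dict.ofList it) "sentence").getD "") = b7)
    (h8 : PySem.Str.isIn "oat-GEN" ((PySem.Dict.get? (PySem.Dict.ofList it) "sentence").getD "") = b8)
    (h9 : (PySem.Str.strip ((PySem.Dict.get? (PySem.Dict.ofList it) "sentence").getD "") == "[?al]"
        || (decide (0 < PySem.Str.count ((PySem.Dict.get? (PySem.Dict.ofList it) "sentence").getD "") "[?al]") && decide (PySem.Str.count ((PySem.Dict.get? (PySem.Dict.ofList it) "sentence").getD "") " " < 5))) = b9) :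
    stepA (mk10 c1 c2 c3 c4 c5 c6 c7 c8 c9 c10) it =
      mk10 (if bch && !bsh then c1 ++ [it] else c1)
           (if bsh && !bch then c2 ++ [it] else c2)
           (if bch && bsh then c3 ++ [it] else c3)
           (if b4 then c4 ++ [it] else c4)
           (if b5 then c5 ++ [it] else c5)
           (if b6 then c6 ++ [it] else c6)
           (if b7 then c7 ++ [it] else c7)
           (if b8 then c8 ++ [it] else c8)
           (if b9 then c9 ++ [it] else c9)
           c10 := by
  simp only [stepA]
  simp only [hch, hsh, h4, h5, h6, h7, h8, h9]
  rw [uverb, u4, u5, u6, u7, u8, u9]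

theorem loopA (xs : List (List (String × String)))
    (c1 c2 c3 c4 c5 c6 c7 c8 c9 c10 : List (List (String × String))) :
    xs.foldl stepA (mk10 c1 c2 c3 c4 c5 c6 c7 c8 c9 c10) =
      mk10 (c1 ++ xs.filter (fun it => pvHasCh it && !pvHasSh it))
           (c2 ++ xs.filter (fun it => pvHasSh it && !pvHasCh it))
           (c3 ++ xs.filter (fun it => pvHasCh it && pvHasSh it))
           (c4 ++ xs.filter (fun it => PySem.Str.isIn "vessel" (PySem.Str.lower (pvSentence it))))
           (c5 ++ xs.filter (fun it => PySem.Str.isIn "water" (PySem.Str.lower (pvSentence it))))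
           (c6 ++ xs.filter (fun it => PySem.Str.isIn "botanical-term" (pvSentence it)))
           (c7 ++ xs.filter (fun it => PySem.Str.isIn "oak-GEN" (pvSentence it)))
           (c8 ++ xs.filter (fun it => PySem.Str.isIn "oat-GEN" (pvSentence it)))
           (c9 ++ xs.filter pvStandalone)
           c10 := by
  induction xs generalizing c1 c2 c3 c4 c5 c6 c7 c8 c9 c10 with
  | nil => simp
  | cons x xs ih =>
    rw [List.foldl_cons,
      step_mk10 x c1 c2 c3 c4 c5 c6 c7 c8 c9 c10 (pvHasCh x) (pvHasSh x)
        (PySem.Str.isIn "vessel" (PySem.Str.lower (pvSentence x)))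
        (PySem.Str.isIn "water" (PySem.Str.lower (pvSentence x)))
        (PySem.Str.isIn "botanical-term" (pvSentence x))
        (PySem.Str.isIn "oak-GEN" (pvSentence x))
        (PySem.Str.isIn "oat-GEN" (pvSentence x))
        (pvStandalone x) rfl rfl rfl rfl rfl rfl rfl rfl, ih]
    simp only [mk10, List.filter_cons, PySem.Dict.mk.injEq, List.cons.injEq, Prod.mk.injEq,
      true_and, and_true]
    refine ⟨?_, ?_, ?_, ?_, ?_, ?_, ?_, ?_, ?_⟩ <;> split <;> simp_all

-- ===== VERDICT (by name: the statement is the Claim_ definition above) =====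
theorem categorize_al_patterns_spec : Claim_equal_categorize_al_patterns := by
  intro al _ _
  show categorize_al_patterns al = categorize_al_patterns_alt al
  show (al.foldl stepA (PySem.Dict.ofList _)).items = _
  have hinit : (PySem.Dict.ofList
      [("with_ch_verb", ([] : List (List (String × String)))), ("with_sh_verb", []), ("with_both_verbs", []),
       ("with_vessel", []), ("with_water", []), ("with_botanical", []),
       ("with_oak_gen", []), ("with_oat_gen", []), ("standalone", []), ("other", [])]) =
      mk10 [] [] [] [] [] [] [] [] [] [] := by rfl
  rw [hinit, loopA]
  rfl
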